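-- pv_equiv track=rewrite | github.com/diegosilveraids/Proyecto_Caraminer_OT | RBOT-CARAMINER-OTGMAO/scripts/rp_helpers/rp_parser_core.py | calculate_counts
-- ===== SOURCE A (Python) =====
-- def calculate_counts(wo_dictionary):
--     unique_tasks = set()
--     unique_work_orders = 0
--     valid_wo_count = 0
--     invalid_wo_count = 0
--
--     for day in wo_dictionary.values():
--         for system in day.values():
--             for task in system:
--                 if task.get("n_task"):
--                     unique_tasks.add(task["n_task"])
--
--                 if task.get("state") == "READ-SUCCESS":
--                     valid_wo_count += 1
--                 else:
--                     invalid_wo_count += 1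
--
--                 unique_work_orders += 1
--
--     return {
--         "tasks_count": len(unique_tasks),
--         "work_orders_count": unique_work_orders,
--         "valid_wo_count": valid_wo_count,
--         "invalid_wo_count": invalid_wo_count,
--     }
-- ===== SOURCE B (Python) =====
-- def calculate_counts(wo_dictionary):
--     # flatten the nested structure, then count uniques by sort-and-scan
--     # (adjacent-difference counting) instead of a hash set, and valid via .count
--     tasks = [t for day in wo_dictionary.values()
--                for system in day.values()
--                for t in system]
--     names = sorted(t["n_task"] for t in tasks if t.get("n_task"))
--     unique = 0 if not names else 1 + sum(1 for a, b in zip(names, names[1:]) if a != b)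
--     valid = [t.get("state") for t in tasks].count("READ-SUCCESS")
--     return {
--         "tasks_count": unique,
--         "work_orders_count": len(tasks),
--         "valid_wo_count": valid,
--         "invalid_wo_count": len(tasks) - valid,
--     }
-- ===== Notes on version B (the rewrite author's own statement) =====
-- stated objective: alternative
-- what changed: Replaces A's single fused triple-nested loop with four accumulators (hash set + three counters) by: flatten to one task list, count unique names by sort-then-adjacent-scan instead of a set, count valid via list.count on the extracted states, derive invalid by subtraction.
import Mathlib
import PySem

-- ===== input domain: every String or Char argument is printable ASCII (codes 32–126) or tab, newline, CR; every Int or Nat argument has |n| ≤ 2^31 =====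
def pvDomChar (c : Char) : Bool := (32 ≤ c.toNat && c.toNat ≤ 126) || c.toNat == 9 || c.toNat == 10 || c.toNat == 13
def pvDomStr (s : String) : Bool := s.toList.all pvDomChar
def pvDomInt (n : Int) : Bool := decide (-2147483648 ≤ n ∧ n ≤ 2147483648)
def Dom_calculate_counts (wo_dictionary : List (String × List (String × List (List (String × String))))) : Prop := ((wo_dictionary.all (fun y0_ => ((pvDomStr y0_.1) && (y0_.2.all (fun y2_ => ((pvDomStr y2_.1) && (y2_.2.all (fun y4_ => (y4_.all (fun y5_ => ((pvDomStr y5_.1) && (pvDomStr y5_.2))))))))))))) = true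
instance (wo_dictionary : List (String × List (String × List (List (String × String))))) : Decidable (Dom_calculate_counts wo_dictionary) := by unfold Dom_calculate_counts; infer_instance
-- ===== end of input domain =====

-- B replaces A's single fused triple-nested loop (hash set + three counters) by flatten, sort-and-adjacent-scan distinct counting, list.count for valid and subtraction for invalid; objective: alternative, same result.


-- ===== PORT A =====
def calculate_counts (wo_dictionary : List (String × List (String × List (List (String × String))))) : List (String × Int) :=
  let st := wo_dictionary.foldl (fun acc day =>
    day.2.foldl (fun acc system =>
      system.2.foldl (fun (acc : PySem.Set String × Int × Int × Int) task =>
        let u := match task.lookup "n_task" with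
          | some s => if s = "" then acc.1 else acc.1.add s
          | none => acc.1
        let vi : Int × Int :=
          if task.lookup "state" = some "READ-SUCCESS"
          then (acc.2.2.1 + 1, acc.2.2.2)
          else (acc.2.2.1, acc.2.2.2 + 1)
        (u, acc.2.1 + 1, vi.1, vi.2)) acc) acc)
    ((PySem.Set.empty : PySem.Set String), (0 : Int), (0 : Int), (0 : Int))
  [("tasks_count", (st.1.length : Int)),
   ("work_orders_count", st.2.1),
   ("valid_wo_count", st.2.2.1),
   ("invalid_wo_count", st.2.2.2)]

-- ===== PORT B =====
-- names[1:] is the tail of the list; zip pairs adjacent elements (exact port of zip(names, names[1:]))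
def calculate_counts_alt (wo_dictionary : List (String × List (String × List (List (String × String))))) : List (String × Int) :=
  let tasks := wo_dictionary.flatMap (fun day => day.2.flatMap (fun system => system.2))
  let names := PySem.List.sorted (tasks.filterMap (fun t =>
      match t.lookup "n_task" with
      | some s => if s = "" then none else some s
      | none => none)) (fun x => x) false
  let unique : Int := if names = [] then 0 else
    1 + (((names.zip names.tail).countP (fun p => p.1 != p.2) : Nat) : Int)
  let valid : Int := (((tasks.map (fun t => t.lookup "state")).count (some "READ-SUCCESS") : Nat) : Int)
  [("tasks_count", unique),
   ("work_orders_count", (tasks.length : Int)),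
   ("valid_wo_count", valid),
   ("invalid_wo_count", (tasks.length : Int) - valid)]

-- ===== PRECONDITION & SPEC =====
def Spec_calculate_counts (wo_dictionary : List (String × List (String × List (List (String × String))))) (out : List (String × Int)) : Prop := out = calculate_counts_alt wo_dictionary
instance (wo_dictionary : List (String × List (String × List (List (String × String))))) (out : List (String × Int)) : Decidable (Spec_calculate_counts wo_dictionary out) := by unfold Spec_calculate_counts; infer_instance

-- ===== CLAIM =====
def Claim_equal_calculate_counts : Prop := ∀ (wo_dictionary : List (String × List (String × List (List (String × String))))), Dom_calculate_counts wo_dictionary → Spec_calculate_counts wo_dictionary (calculate_counts wo_dictionary)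

-- ===== LEMMAS AND PROOFS =====

-- step function of A's innermost loop (named only for the proofs)
def pvStep (acc : PySem.Set String × Int × Int × Int) (task : List (String × String)) :
    PySem.Set String × Int × Int × Int :=
  let u := match task.lookup "n_task" with
    | some s => if s = "" then acc.1 else acc.1.add s
    | none => acc.1
  let vi : Int × Int :=
    if task.lookup "state" = some "READ-SUCCESS"
    then (acc.2.2.1 + 1, acc.2.2.2)
    else (acc.2.2.1, acc.2.2.2 + 1)
  (u, acc.2.1 + 1, vi.1, vi.2)

def pvName (t : List (String × String)) : Option String :=
  match t.lookup "n_task" with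
  | some s => if s = "" then none else some s
  | none => none

def pvValid (t : List (String × String)) : Bool :=
  t.lookup "state" = some "READ-SUCCESS"

theorem pvStep_eq (acc : PySem.Set String × Int × Int × Int) (t : List (String × String)) :
    pvStep acc t =
      ((match t.lookup "n_task" with
         | some s => if s = "" then acc.1 else acc.1.add s
         | none => acc.1),
       acc.2.1 + 1,
       (if t.lookup "state" = some "READ-SUCCESS" then acc.2.2.1 + 1 else acc.2.2.1),
       (if t.lookup "state" = some "READ-SUCCESS" then acc.2.2.2 else acc.2.2.2 + 1)) := by
  unfold pvStep
  by_cases hs : t.lookup "state" = some "READ-SUCCESS" <;> simp [hs]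

theorem pvStep_fold (tasks : List (List (String × String)))
    (u : PySem.Set String) (w v i : Int) :
    tasks.foldl pvStep (u, w, v, i) =
      ((tasks.filterMap pvName).foldl PySem.Set.add u,
       w + (tasks.length : Int),
       v + ((tasks.filter pvValid).length : Int),
       i + ((tasks.length : Int) - ((tasks.filter pvValid).length : Int))) := by
  induction tasks generalizing u w v i with
  | nil => simp
  | cons t ts ih =>
    rw [List.foldl_cons, pvStep_eq, ih]
    simp only [List.filterMap_cons, List.filter_cons, List.length_cons, Prod.mk.injEq]
    cases hN : t.lookup "n_task" with
    | none =>
      by_cases hs : t.lookup "state" = some "READ-SUCCESS" <;>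
        · simp [pvName, pvValid, hN, hs] <;> omega
    | some s =>
      by_cases he : s = "" <;> by_cases hs : t.lookup "state" = some "READ-SUCCESS" <;>
        · simp [pvName, pvValid, hN, he, hs] <;> omega

-- A's set length is the number of distinct names
theorem pvOfList_length (l : List String) :
    (PySem.Set.ofList l).length = l.toFinset.card := by
  have hn : (PySem.Set.ofList l).Nodup := PySem.Set.nodup_ofList l
  have hfin : (PySem.Set.ofList l).toFinset = l.toFinset := by
    ext x
    simp [PySem.Set.mem_ofList]
  rw [← hfin, List.toFinset_card_of_nodup hn]

-- B's adjacent-difference scan on a (≤)-sorted list counts the distinct elements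
theorem pvChain_count (l : List String) (h : l.Pairwise (· ≤ ·)) :
    (if l = [] then 0 else 1 + (l.zip l.tail).countP (fun p => p.1 != p.2)) = l.toFinset.card := by
  induction l with
  | nil => simp
  | cons x xs ih =>
    cases xs with
    | nil => simp
    | cons y ys =>
      have hx : ∀ z ∈ y :: ys, x ≤ z := (List.pairwise_cons.mp h).1
      have h' : (y :: ys).Pairwise (· ≤ ·) := (List.pairwise_cons.mp h).2
      have hy : ∀ z ∈ ys, y ≤ z := (List.pairwise_cons.mp h').1
      have hihy : 1 + ((y :: ys).zip ys).countP (fun p => p.1 != p.2) = (y :: ys).toFinset.card := by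
        simpa using ih h'
      by_cases hxy : x = y
      · subst hxy
        have hfs : (x :: x :: ys).toFinset = (x :: ys).toFinset := by simp
        have : ((x :: x :: ys).zip (x :: ys)).countP (fun p => p.1 != p.2)
            = ((x :: ys).zip ys).countP (fun p => p.1 != p.2) := by
          simp [List.zip]
        simp only [List.tail_cons, if_neg (by simp : ¬(x :: x :: ys = [])), this, hfs]
        exact hihy
      · have hnot : x ∉ y :: ys := by
          intro hmem
          rcases List.mem_cons.mp hmem with h1 | h2
          · exact hxy h1
          · exact hxy (le_antisymm (hx y (by simp)) (hy x h2))
        have hcard : (x :: y :: ys).toFinset.card = (y :: ys).toFinset.card + 1 := by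
          simp only [List.toFinset_cons]
          rw [Finset.card_insert_of_notMem (by simpa using hnot)]
        have hz : ((x :: y :: ys).zip (y :: ys)).countP (fun p => p.1 != p.2)
            = ((y :: ys).zip ys).countP (fun p => p.1 != p.2) + 1 := by
          simp [List.zip, List.countP_cons, hxy]
        simp only [List.tail_cons, if_neg (by simp : ¬(x :: y :: ys = [])), hz, hcard]
        omega

-- valid count: A's filter length is B's list.count over the extracted states
theorem pvValid_count (ts : List (List (String × String))) :
    ((ts.filter pvValid).length : Int)
      = (((ts.map (fun t => t.lookup "state")).count (some "READ-SUCCESS") : Nat) : Int) := by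
  have h1 : (ts.map (fun t => t.lookup "state")).count (some "READ-SUCCESS") = ts.countP pvValid := by
    simp only [List.count, List.countP_map, Function.comp_def]
    apply List.countP_congr
    intro t _
    simp [pvValid]
  rw [h1, ← List.countP_eq_length_filter]

-- ===== VERDICT (by name: the statement is the Claim_ definition above) =====
theorem calculate_counts_spec : Claim_equal_calculate_counts := by
  intro wo _
  unfold Spec_calculate_counts calculate_counts calculate_counts_alt
  have hl : (fun (acc : PySem.Set String × Int × Int × Int) task =>
      let u := match task.lookup "n_task" with
        | some s => if s = "" then acc.1 else acc.1.add s
        | none => acc.1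
      let vi : Int × Int :=
        if task.lookup "state" = some "READ-SUCCESS"
        then (acc.2.2.1 + 1, acc.2.2.2)
        else (acc.2.2.1, acc.2.2.2 + 1)
      (u, acc.2.1 + 1, vi.1, vi.2)) = pvStep := rfl
  rw [hl]
  have key := pvStep_fold (wo.flatMap fun day => day.2.flatMap fun system => system.2)
      PySem.Set.empty 0 0 0
  simp only [List.foldl_flatMap] at key
  rw [key]
  have hname_eq : (fun (t : List (String × String)) =>
      match t.lookup "n_task" with
      | some s => if s = "" then none else some s
      | none => none) = pvName := rfl
  rw [hname_eq]
  dsimp only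
  set tasks := wo.flatMap fun day => day.2.flatMap fun system => system.2 with htasks
  set names := tasks.filterMap pvName with hnames
  have hAset : (names.foldl PySem.Set.add PySem.Set.empty).length = names.toFinset.card := by
    have hfold : names.foldl PySem.Set.add PySem.Set.empty = PySem.Set.ofList names := rfl
    rw [hfold, pvOfList_length]
  set snames := PySem.List.sorted names (fun x => x) false with hsn
  have hsortPW : snames.Pairwise (· ≤ ·) := by
    have := PySem.List.sorted_pairwise names (fun x => x) (κ := String)
    simpa using this
  have hperm : snames.Perm names := PySem.List.sorted_perm names (fun x => x) false
  have hBset := pvChain_count snames hsortPW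
  rw [List.toFinset_eq_of_perm _ _ hperm] at hBset
  have hBsetZ : (if snames = [] then (0 : Int)
      else 1 + ((snames.zip snames.tail).countP (fun p => p.1 != p.2) : Nat))
      = (names.toFinset.card : Int) := by
    by_cases hnil : snames = []
    · rw [if_pos hnil] at hBset ⊢
      exact_mod_cast hBset
    · rw [if_neg hnil] at hBset ⊢
      exact_mod_cast hBset
  rw [hBsetZ, hAset, pvValid_count]
  simp
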